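-- pv_equiv track=rewrite | github.com/incnone/necrobot | daily.py | _format_as_timestr
-- ===== SOURCE A (Python) =====
-- def _format_as_timestr(hours, minutes):
--     while minutes >= 60:
--         minutes -= 60
--         hours += 1
--
--     if minutes == 0 and hours == 0:
--         return 'under a minute'
--     else:
--         min_str = 'minute' if minutes == 1 else 'minutes'
--         hr_str = 'hour' if hours == 1 else 'hours'
--         return '{0} {1}, {2} {3}'.format(hours, hr_str, minutes, min_str)
-- ===== SOURCE B (Python) =====
-- def _plural(n, unit):
--     return '{0} {1}'.format(n, unit) + ('' if n == 1 else 's')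
--
--
-- def _format_as_timestr(hours, minutes):
--     if minutes >= 60:
--         hours, minutes = hours + minutes // 60, minutes % 60
--     if hours == 0 and minutes == 0:
--         return 'under a minute'
--     return ', '.join([_plural(hours, 'hour'), _plural(minutes, 'minute')])
-- ===== Notes on version B (the rewrite author's own statement) =====
-- stated objective: simpler
-- what changed: The repeated-subtraction while-loop is replaced by one guarded divmod normalization, and the duplicated ternary pluralization plus 4-slot format string is replaced by a _plural(n, unit) helper joined with ', '.
import Mathlib
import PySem

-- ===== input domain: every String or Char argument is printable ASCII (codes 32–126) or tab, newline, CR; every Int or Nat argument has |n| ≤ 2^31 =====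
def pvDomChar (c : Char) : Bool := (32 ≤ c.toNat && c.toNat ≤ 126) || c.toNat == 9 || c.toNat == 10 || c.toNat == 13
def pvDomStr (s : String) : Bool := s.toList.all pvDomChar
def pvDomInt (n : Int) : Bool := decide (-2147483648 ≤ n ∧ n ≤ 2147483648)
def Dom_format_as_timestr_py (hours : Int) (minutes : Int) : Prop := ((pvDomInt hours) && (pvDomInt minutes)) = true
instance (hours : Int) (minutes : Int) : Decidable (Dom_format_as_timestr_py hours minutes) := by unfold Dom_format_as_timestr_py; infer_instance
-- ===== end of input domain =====

-- B replaces the repeated-subtraction while-loop by one guarded divmod and the duplicated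
-- ternary pluralization + 4-slot format string by a _plural helper joined with ", "; objective: simpler.
-- ===== PORT A =====
-- the while-loop: repeatedly subtract 60 from minutes, adding 1 to hours
def pvLoopA (hours : Int) (minutes : Int) : Int × Int :=
  if 60 ≤ minutes then pvLoopA (hours + 1) (minutes - 60) else (hours, minutes)
termination_by minutes.toNat
decreasing_by omega

def format_as_timestr_py (hours : Int) (minutes : Int) : String :=
  let p := pvLoopA hours minutes
  let hours := p.1
  let minutes := p.2
  if minutes = 0 ∧ hours = 0 then "under a minute"
  else
    let min_str := if minutes = 1 then "minute" else "minutes"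
    let hr_str := if hours = 1 then "hour" else "hours"
    PySem.Int.toStr hours ++ " " ++ hr_str ++ ", " ++ PySem.Int.toStr minutes ++ " " ++ min_str

-- ===== PORT B =====
def pvPlural (n : Int) (unit : String) : String :=
  (PySem.Int.toStr n ++ " " ++ unit) ++ (if n = 1 then "" else "s")

def format_as_timestr_py_alt (hours : Int) (minutes : Int) : String :=
  let p : Int × Int :=
    if 60 ≤ minutes then (hours + PySem.Int.floordiv minutes 60, PySem.Int.mod minutes 60)
    else (hours, minutes)
  let hours := p.1
  let minutes := p.2
  if hours = 0 ∧ minutes = 0 then "under a minute"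
  else String.intercalate ", " [pvPlural hours "hour", pvPlural minutes "minute"]

-- ===== PRECONDITION & SPEC =====
def Spec_format_as_timestr_py (hours : Int) (minutes : Int) (out : String) : Prop := out = format_as_timestr_py_alt hours minutes
instance (hours : Int) (minutes : Int) (out : String) : Decidable (Spec_format_as_timestr_py hours minutes out) := by unfold Spec_format_as_timestr_py; infer_instance

-- ===== CLAIM =====
def Claim_equal_format_as_timestr_py : Prop := ∀ (hours : Int) (minutes : Int), Dom_format_as_timestr_py hours minutes → Spec_format_as_timestr_py hours minutes (format_as_timestr_py hours minutes)

-- ===== LEMMAS AND PROOFS =====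
lemma pvLoopA_eq (minutes : Int) (hours : Int) :
    pvLoopA hours minutes =
      if 60 ≤ minutes then (hours + minutes / 60, minutes % 60) else (hours, minutes) := by
  induction hours, minutes using pvLoopA.induct with
  | case1 hours minutes h ih =>
    rw [pvLoopA]
    simp only [if_pos h, ih]
    split_ifs with h2
    · exact Prod.ext (by simp only []; omega) (by simp only []; omega)
    · exact Prod.ext (by simp only []; omega) (by simp only []; omega)
  | case2 hours minutes h =>
    rw [pvLoopA]
    simp only [if_neg h]

lemma intercalate_pair (a b : String) : String.intercalate ", " [a, b] = a ++ ", " ++ b := by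
  simp only [String.intercalate]
  exact (String.append_left_inj a).mp rfl

lemma body_eq (h m : Int) :
    (if m = 0 ∧ h = 0 then "under a minute"
     else PySem.Int.toStr h ++ " " ++ (if h = 1 then "hour" else "hours") ++ ", " ++
          PySem.Int.toStr m ++ " " ++ (if m = 1 then "minute" else "minutes")) =
    (if h = 0 ∧ m = 0 then "under a minute"
     else String.intercalate ", " [pvPlural h "hour", pvPlural m "minute"]) := by
  by_cases hz : m = 0 ∧ h = 0
  · rw [if_pos hz, if_pos ⟨hz.2, hz.1⟩]
  · have hz' : ¬(h = 0 ∧ m = 0) := fun hab => hz ⟨hab.2, hab.1⟩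
    rw [if_neg hz, if_neg hz', intercalate_pair]
    unfold pvPlural
    split_ifs <;> simp [String.append_assoc]

-- ===== VERDICT =====
theorem format_as_timestr_py_spec : Claim_equal_format_as_timestr_py := by
  intro hours minutes _
  unfold Spec_format_as_timestr_py format_as_timestr_py format_as_timestr_py_alt
  rw [pvLoopA_eq]
  by_cases h : 60 ≤ minutes
  · simp only [if_pos h,
      PySem.Int.floordiv_eq_ediv_of_pos (by omega : (0:Int) < 60),
      PySem.Int.mod_eq_emod_of_pos (by omega : (0:Int) < 60)]
    exact body_eq _ _
  · simp only [if_neg h]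
    exact body_eq _ _
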